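-- pv_equiv track=rewrite | github.com/glenyeh0804/CIT-590 | Sep29_squarelotrons.py | inverse_diagonal_flip
-- ===== SOURCE A (Python) =====
-- import copy
--
-- def inverse_diagonal_flip(squarelotron, ring):
--     """Return a new squarelotron that is flipped inverse diagonal"""
--     new_squarelotron = copy.deepcopy(squarelotron)
--     if ring == 'outer':
--         for i in range(0, 4):
--             new_squarelotron[0][i], new_squarelotron[4 - i][4] = new_squarelotron[4 - i][4], new_squarelotron[0][i]
--         for i in range(1, 4):
--             new_squarelotron[i][0], new_squarelotron[4][4 - i] = new_squarelotron[4][4 - i], new_squarelotron[i][0]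
--     if ring == 'inner':
--         new_squarelotron[1][2], new_squarelotron[2][3] = new_squarelotron[2][3], new_squarelotron[1][2]
--         new_squarelotron[1][1], new_squarelotron[3][3] = new_squarelotron[3][3], new_squarelotron[1][1]
--         new_squarelotron[2][1], new_squarelotron[3][2] = new_squarelotron[3][2], new_squarelotron[2][1]
--     return new_squarelotron
-- ===== SOURCE B (Python) =====
-- import copy
--
-- def inverse_diagonal_flip(squarelotron, ring):
--     """Return a new squarelotron that is flipped inverse diagonal"""
--     if ring == 'outer':
--         member = lambda i, j: i in (0, 4) or j in (0, 4)
--     elif ring == 'inner':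
--         member = lambda i, j: 1 <= i <= 3 and 1 <= j <= 3 and (i, j) != (2, 2)
--     else:
--         return copy.deepcopy(squarelotron)
--     return [[squarelotron[4 - j][4 - i] if member(i, j) else squarelotron[i][j]
--              for j in range(5)] for i in range(5)]
-- ===== Notes on version B (the rewrite author's own statement) =====
-- stated objective: simpler
-- what changed: A deep-copies and performs seven in-place pair swaps along the anti-diagonal; B builds a fresh grid with one comprehension that, at every ring cell (i,j), reads the reflected cell [4-j][4-i] of the untouched original.
import Mathlib
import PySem

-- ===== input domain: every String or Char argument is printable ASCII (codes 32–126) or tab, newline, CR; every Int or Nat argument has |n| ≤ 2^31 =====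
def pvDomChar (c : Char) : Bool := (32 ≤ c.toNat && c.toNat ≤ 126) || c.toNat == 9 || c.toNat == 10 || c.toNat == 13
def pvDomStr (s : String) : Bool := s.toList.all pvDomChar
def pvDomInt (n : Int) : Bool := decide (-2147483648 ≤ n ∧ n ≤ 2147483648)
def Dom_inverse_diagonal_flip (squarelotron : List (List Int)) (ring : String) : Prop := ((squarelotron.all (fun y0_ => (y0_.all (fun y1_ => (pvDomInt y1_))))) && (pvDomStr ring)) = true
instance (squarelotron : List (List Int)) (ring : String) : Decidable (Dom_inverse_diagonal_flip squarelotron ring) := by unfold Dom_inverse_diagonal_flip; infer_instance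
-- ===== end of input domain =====

-- B replaces A's deep-copy-and-swap with a single comprehension reading anti-diagonal-reflected
-- cells from the untouched original grid (objective: simpler).


-- ===== PORT A =====
-- cell read / write / pair swap on a grid (Python's g[i][j] reads and tuple-swap assignment);
-- in-range on Pre_, so the getD defaults are never consulted there.
def pvGetCell (g : List (List Int)) (i j : Nat) : Int := (g.getD i []).getD j 0
def pvSetCell (g : List (List Int)) (i j : Nat) (v : Int) : List (List Int) :=
  g.set i ((g.getD i []).set j v)
-- Python 'g[i1][j1], g[i2][j2] = g[i2][j2], g[i1][j1]': RHS read first, then assigned in order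
def pvSwap (g : List (List Int)) (i1 j1 i2 j2 : Nat) : List (List Int) :=
  let v1 := pvGetCell g i1 j1
  let v2 := pvGetCell g i2 j2
  pvSetCell (pvSetCell g i1 j1 v2) i2 j2 v1

def inverse_diagonal_flip (squarelotron : List (List Int)) (ring : String) : List (List Int) :=
  -- deepcopy is the identity on an immutable value
  let g0 := squarelotron
  let g1 :=
    if ring = "outer" then
      let ga := (PySem.List.pyRange 0 4 1).foldl
        (fun g i => pvSwap g 0 i.toNat (4 - i).toNat 4) g0
      (PySem.List.pyRange 1 4 1).foldl
        (fun g i => pvSwap g i.toNat 0 4 (4 - i).toNat) ga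
    else g0
  if ring = "inner" then
    pvSwap (pvSwap (pvSwap g1 1 2 2 3) 1 1 3 3) 2 1 3 2
  else g1

-- ===== PORT B =====
def pvMemberOuter (i j : Nat) : Bool := i = 0 || i = 4 || j = 0 || j = 4
def pvMemberInner (i j : Nat) : Bool :=
  (1 ≤ i && i ≤ 3) && (1 ≤ j && j ≤ 3) && !(i = 2 && j = 2)

def pvReflectGrid (squarelotron : List (List Int)) (member : Nat → Nat → Bool) : List (List Int) :=
  (List.range 5).map (fun i =>
    (List.range 5).map (fun j =>
      if member i j then pvGetCell squarelotron (4 - j) (4 - i)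
      else pvGetCell squarelotron i j))

def inverse_diagonal_flip_alt (squarelotron : List (List Int)) (ring : String) : List (List Int) :=
  if ring = "outer" then pvReflectGrid squarelotron pvMemberOuter
  else if ring = "inner" then pvReflectGrid squarelotron pvMemberInner
  else squarelotron

-- ===== PRECONDITION & SPEC =====
-- Pre_ restricts 'outer'/'inner' calls to exactly-5x5 grids, the fixed squarelotron shape the
-- function is written for; A also happens to return on some larger or ragged grids (it only ever
-- touches the ring indices), where B either raises (ragged) or returns just the 5x5 block (larger).
def Pre_inverse_diagonal_flip (squarelotron : List (List Int)) (ring : String) : Prop :=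
  (ring = "outer" ∨ ring = "inner") →
    (squarelotron.length = 5 ∧ ∀ r ∈ squarelotron, r.length = 5)
instance (squarelotron : List (List Int)) (ring : String) : Decidable (Pre_inverse_diagonal_flip squarelotron ring) := by unfold Pre_inverse_diagonal_flip; infer_instance

def pvWitness_inverse_diagonal_flip : List (List Int) × String :=
  ([[1,2,3,4,5],[6,7,8,9,10],[11,12,13,14,15],[16,17,18,19,20],[21,22,23,24,25]], "outer")

def Spec_inverse_diagonal_flip (squarelotron : List (List Int)) (ring : String) (out : List (List Int)) : Prop := out = inverse_diagonal_flip_alt squarelotron ring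
instance (squarelotron : List (List Int)) (ring : String) (out : List (List Int)) : Decidable (Spec_inverse_diagonal_flip squarelotron ring out) := by unfold Spec_inverse_diagonal_flip; infer_instance

-- ===== CLAIM (what is proved, stated in full; the proofs are below) =====
def Claim_equal_inverse_diagonal_flip : Prop := ∀ (squarelotron : List (List Int)) (ring : String), Dom_inverse_diagonal_flip squarelotron ring → Pre_inverse_diagonal_flip squarelotron ring → Spec_inverse_diagonal_flip squarelotron ring (inverse_diagonal_flip squarelotron ring)

-- ===== LEMMAS AND PROOFS =====
theorem pv_len5 {α : Type} (l : List α) (h : l.length = 5) :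
    ∃ a b c d e, l = [a, b, c, d, e] := by
  match l, h with
  | [a, b, c, d, e], _ => exact ⟨a, b, c, d, e, rfl⟩

-- ===== VERDICT (by name: the statement is the Claim_ definition above) =====
theorem inverse_diagonal_flip_spec : Claim_equal_inverse_diagonal_flip := by
  intro g ring _ hpre
  unfold Spec_inverse_diagonal_flip
  by_cases ho : ring = "outer"
  · obtain ⟨hlen, hrows⟩ := hpre (Or.inl ho)
    obtain ⟨r0, r1, r2, r3, r4, rfl⟩ := pv_len5 g hlen
    obtain ⟨a0, a1, a2, a3, a4, rfl⟩ := pv_len5 r0 (hrows r0 (by simp))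
    obtain ⟨b0, b1, b2, b3, b4, rfl⟩ := pv_len5 r1 (hrows r1 (by simp))
    obtain ⟨c0, c1, c2, c3, c4, rfl⟩ := pv_len5 r2 (hrows r2 (by simp))
    obtain ⟨d0, d1, d2, d3, d4, rfl⟩ := pv_len5 r3 (hrows r3 (by simp))
    obtain ⟨e0, e1, e2, e3, e4, rfl⟩ := pv_len5 r4 (hrows r4 (by simp))
    subst ho
    simp [inverse_diagonal_flip, inverse_diagonal_flip_alt, pvReflectGrid, pvSwap, pvSetCell,
          pvGetCell, pvMemberOuter, PySem.List.pyRange, List.range, List.range.loop]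
  · by_cases hi : ring = "inner"
    · obtain ⟨hlen, hrows⟩ := hpre (Or.inr hi)
      obtain ⟨r0, r1, r2, r3, r4, rfl⟩ := pv_len5 g hlen
      obtain ⟨a0, a1, a2, a3, a4, rfl⟩ := pv_len5 r0 (hrows r0 (by simp))
      obtain ⟨b0, b1, b2, b3, b4, rfl⟩ := pv_len5 r1 (hrows r1 (by simp))
      obtain ⟨c0, c1, c2, c3, c4, rfl⟩ := pv_len5 r2 (hrows r2 (by simp))
      obtain ⟨d0, d1, d2, d3, d4, rfl⟩ := pv_len5 r3 (hrows r3 (by simp))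
      obtain ⟨e0, e1, e2, e3, e4, rfl⟩ := pv_len5 r4 (hrows r4 (by simp))
      subst hi
      simp [inverse_diagonal_flip, inverse_diagonal_flip_alt, pvReflectGrid, pvSwap, pvSetCell,
            pvGetCell, pvMemberInner, List.range, List.range.loop]
    · simp [inverse_diagonal_flip, inverse_diagonal_flip_alt, ho, hi]
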